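-- pv_equiv track=rewrite | github.com/shree1892001/address | app/Services/TableExtractionService.py | _detect_table_regions_dynamic
-- ===== SOURCE A (Python) =====
-- def _detect_table_regions_dynamic(all_rows):
--     """Dynamically detect table regions based on structure changes"""
--     try:
--         regions = []
--         current_region = []
--         prev_cols = 0
--
--         for row in all_rows:
--             row_data = [span["text"].strip() for span in row if span["text"].strip()]
--             if not row_data:
--                 if len(current_region) >= 2:
--                     regions.append({'rows': current_region})
--                 current_region = []
--                 prev_cols = 0
--                 continue
--
--             curr_cols = len(row_data)
--
--             # Structure change detection
--             if prev_cols > 0 and abs(curr_cols - prev_cols) > 0: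
--                 if len(current_region) >= 2:
--                     regions.append({'rows': current_region})
--                 current_region = [row_data]
--             else:
--                 current_region.append(row_data)
--
--             prev_cols = curr_cols
--
--         if len(current_region) >= 2:
--             regions.append({'rows': current_region})
--
--         return regions
--     except:
--         return []
-- ===== SOURCE B (Python) =====
-- def _detect_table_regions_dynamic(all_rows):
--     """Two-phase: first flatten every row to its stripped non-empty texts,
--     then chunk the processed rows into maximal equal-column runs with a
--     two-pointer scan; runs of length >= 2 become regions."""
--     try:
--         processed = [[span["text"].strip() for span in row if span["text"].strip()]
--                      for row in all_rows]
--     except: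
--         return []
--     regions = []
--     n = len(processed)
--     i = 0
--     while i < n:
--         row = processed[i]
--         if not row:
--             i += 1
--             continue
--         k = len(row)
--         j = i + 1
--         while j < n and processed[j] and len(processed[j]) == k:
--             j += 1
--         if j - i >= 2:
--             regions.append({'rows': processed[i:j]})
--         i = j
--     return regions
-- ===== Notes on version B (the rewrite author's own statement) =====
-- stated objective: alternative
-- what changed: Replaces A's single-pass state machine (current_region/prev_cols accumulator with three mutation sites) by a two-phase algorithm: map all rows to their stripped texts first, then chunk the processed list into maximal equal-column runs with a two-pointer scan.
import Mathlib
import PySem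

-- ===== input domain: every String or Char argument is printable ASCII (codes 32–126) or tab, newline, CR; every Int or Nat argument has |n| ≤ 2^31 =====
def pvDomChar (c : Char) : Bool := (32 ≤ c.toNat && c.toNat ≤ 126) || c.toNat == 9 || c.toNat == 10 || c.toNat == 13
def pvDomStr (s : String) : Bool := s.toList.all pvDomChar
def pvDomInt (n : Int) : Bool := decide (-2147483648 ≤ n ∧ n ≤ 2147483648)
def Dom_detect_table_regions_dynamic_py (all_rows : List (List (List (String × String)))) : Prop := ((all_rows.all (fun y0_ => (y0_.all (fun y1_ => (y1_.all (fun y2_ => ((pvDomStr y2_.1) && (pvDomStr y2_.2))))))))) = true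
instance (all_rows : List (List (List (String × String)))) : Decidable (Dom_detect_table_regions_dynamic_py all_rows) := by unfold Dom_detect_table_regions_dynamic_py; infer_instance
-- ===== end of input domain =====

-- B replaces A's single-pass state machine by a map-then-chunk two-pointer scan ("alternative": different decomposition, same O(n) cost).

-- ===== PORT A =====
-- row_data = [span["text"].strip() for span in row if span["text"].strip()]; none = a span without "text" (KeyError → caught, whole call returns [])
def pvRowDataA : List (List (String × String)) → Option (List String)
  | [] => some []
  | span :: rest =>
    match (PySem.Dict.mk span).get? "text" with
    | none => none
    | some t =>
      match pvRowDataA rest with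
      | none => none
      | some l =>
        let s := PySem.Str.strip t
        if s ≠ "" then some (s :: l) else some l

-- A's loop; state = (regions so-far, current_region, prev_cols); the [] base also performs the final ≥2 flush.
-- Python's 'abs(curr_cols - prev_cols) > 0' is ported as 'curr ≠ prev'.
def pvLoopA : List (List (List (String × String))) → List (List (String × List (List String))) → List (List String) → Nat → List (List (String × List (List String)))
  | [], regions, cur, _ => regions ++ (if cur.length ≥ 2 then [[("rows", cur)]] else [])
  | row :: rest, regions, cur, prev =>
    match pvRowDataA row with
    | none => []  -- KeyError propagates to the bare except: return []
    | some rd =>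
      if rd = [] then
        pvLoopA rest (regions ++ (if cur.length ≥ 2 then [[("rows", cur)]] else [])) [] 0
      else if 0 < prev ∧ rd.length ≠ prev then
        pvLoopA rest (regions ++ (if cur.length ≥ 2 then [[("rows", cur)]] else [])) [rd] rd.length
      else
        pvLoopA rest regions (cur ++ [rd]) rd.length

def detect_table_regions_dynamic_py (all_rows : List (List (List (String × String)))) : List (List (String × List (List String))) :=
  pvLoopA all_rows [] [] 0

-- ===== PORT B =====
def pvRowDataB : List (List (String × String)) → Option (List String)
  | [] => some []
  | span :: rest =>
    match (PySem.Dict.mk span).get? "text" with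
    | none => none
    | some t =>
      match pvRowDataB rest with
      | none => none
      | some l =>
        let s := PySem.Str.strip t
        if s ≠ "" then some (s :: l) else some l

-- the outer comprehension: processed = [row_data(row) for row in all_rows], KeyError → none
def pvProcessB : List (List (List (String × String))) → Option (List (List String))
  | [] => some []
  | row :: rest =>
    match pvRowDataB row with
    | none => none
    | some rd =>
      match pvProcessB rest with
      | none => none
      | some l => some (rd :: l)

-- the two-pointer while-loop: skip an empty row, else split off the maximal run of
-- non-empty rows with the same column count (inner while ↔ takeWhile/dropWhile), keep it if ≥ 2 long
def pvChunksB : List (List String) → List (List (String × List (List String)))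
  | [] => []
  | r :: rs =>
    if r = [] then pvChunksB rs
    else
      let run := rs.takeWhile (fun x => !x.isEmpty && x.length == r.length)
      let rest := rs.dropWhile (fun x => !x.isEmpty && x.length == r.length)
      (if (r :: run).length ≥ 2 then [[("rows", r :: run)]] else []) ++ pvChunksB rest
  termination_by l => l.length
  decreasing_by
    · simp
    · have := List.length_dropWhile_le (fun x => !x.isEmpty && x.length == r.length) rs
      simp only [List.length_cons]; omega

def detect_table_regions_dynamic_py_alt (all_rows : List (List (List (String × String)))) : List (List (String × List (List String))) :=
  match pvProcessB all_rows with
  | none => []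
  | some proc => pvChunksB proc

-- ===== PRECONDITION & SPEC =====
-- Pre_ excludes only inputs in which some span lists the "text" key twice: a Python dict cannot
-- hold a duplicate key, so such association lists encode no real Python input (a first-match
-- lookup there would be an artefact of the encoding, not of either program).
def Pre_detect_table_regions_dynamic_py (all_rows : List (List (List (String × String)))) : Prop :=
  (all_rows.all (fun row => row.all (fun span => (span.map Prod.fst).count "text" ≤ 1))) = true
instance (all_rows : List (List (List (String × String)))) : Decidable (Pre_detect_table_regions_dynamic_py all_rows) := by unfold Pre_detect_table_regions_dynamic_py; infer_instance

def pvWitness_detect_table_regions_dynamic_py : (List (List (List (String × String)))) :=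
  [[[("text", " a ")], [("text", "b")]], [[("text", "c")], [("text", "d")]]]

def Spec_detect_table_regions_dynamic_py (all_rows : List (List (List (String × String)))) (out : List (List (String × List (List String)))) : Prop := out = detect_table_regions_dynamic_py_alt all_rows
instance (all_rows : List (List (List (String × String)))) (out : List (List (String × List (List String)))) : Decidable (Spec_detect_table_regions_dynamic_py all_rows out) := by unfold Spec_detect_table_regions_dynamic_py; infer_instance

-- ===== CLAIM (what is proved, stated in full; the proofs are below) =====
def Claim_equal_detect_table_regions_dynamic_py : Prop := ∀ (all_rows : List (List (List (String × String)))), Dom_detect_table_regions_dynamic_py all_rows → Pre_detect_table_regions_dynamic_py all_rows → Spec_detect_table_regions_dynamic_py all_rows (detect_table_regions_dynamic_py all_rows)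

-- ===== LEMMAS AND PROOFS =====

theorem pvRowData_eq (row : List (List (String × String))) : pvRowDataA row = pvRowDataB row := by
  induction row with
  | nil => rfl
  | cons span rest ih => simp [pvRowDataA, pvRowDataB, ih]

-- A's pure loop on already-processed rows (proof-only helper)
def pvLoopP : List (List String) → List (List (String × List (List String))) → List (List String) → Nat → List (List (String × List (List String)))
  | [], regions, cur, _ => regions ++ (if cur.length ≥ 2 then [[("rows", cur)]] else [])
  | rd :: rest, regions, cur, prev =>
    if rd = [] then
      pvLoopP rest (regions ++ (if cur.length ≥ 2 then [[("rows", cur)]] else [])) [] 0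
    else if 0 < prev ∧ rd.length ≠ prev then
      pvLoopP rest (regions ++ (if cur.length ≥ 2 then [[("rows", cur)]] else [])) [rd] rd.length
    else
      pvLoopP rest regions (cur ++ [rd]) rd.length

-- A's loop factors through the processed list: KeyError anywhere → [], otherwise the pure loop.
theorem pvLoopA_eq_processed (rows : List (List (List (String × String))))
    (regions : List (List (String × List (List String)))) (cur : List (List String)) (prev : Nat) :
    pvLoopA rows regions cur prev =
      match pvProcessB rows with
      | none => []
      | some proc => pvLoopP proc regions cur prev := by
  induction rows generalizing regions cur prev with
  | nil => rfl
  | cons row rest ih =>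
    simp only [pvLoopA, pvProcessB, pvRowData_eq]
    cases h : pvRowDataB row with
    | none => rfl
    | some rd =>
      simp only []
      by_cases h1 : rd = [] <;> by_cases h2 : 0 < prev ∧ rd.length ≠ prev <;>
        simp [h1, h2, ih] <;> cases pvProcessB rest <;> simp [pvLoopP, h1, h2]

-- the continuation of pvChunksB in the middle of a run keyed by column count k
def pvChunksCont (cur : List (List String)) (k : Nat) (l : List (List String)) : List (List (String × List (List String))) :=
  let run := l.takeWhile (fun x => !x.isEmpty && x.length == k)
  let rest := l.dropWhile (fun x => !x.isEmpty && x.length == k)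
  (if (cur ++ run).length ≥ 2 then [[("rows", cur ++ run)]] else []) ++ pvChunksB rest

theorem pvChunksB_nil_cons (rs : List (List String)) : pvChunksB ([] :: rs) = pvChunksB rs := by
  rw [pvChunksB.eq_def]; simp

theorem pvChunksB_cons {r : List String} (rs : List (List String)) (h : r ≠ []) :
    pvChunksB (r :: rs) = pvChunksCont [r] r.length rs := by
  rw [pvChunksB.eq_def]
  simp only [if_neg h, pvChunksCont, List.cons_append, List.nil_append]

theorem pvLoopP_chunks (proc : List (List String)) :
    (∀ regions cur prev, 0 < prev →
        pvLoopP proc regions cur prev = regions ++ pvChunksCont cur prev proc) ∧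
    (∀ regions, pvLoopP proc regions [] 0 = regions ++ pvChunksB proc) := by
  induction proc with
  | nil =>
    constructor
    · intro regions cur prev _
      simp [pvLoopP, pvChunksCont, pvChunksB]
    · intro regions; simp [pvLoopP, pvChunksB]
  | cons r rs ih =>
    have ihA := ih.1
    have ihB := ih.2
    constructor
    · intro regions cur prev hprev
      by_cases h1 : r = []
      · subst h1
        simp only [pvLoopP]
        rw [if_pos trivial]
        rw [ihB]
        simp only [pvChunksCont, List.takeWhile_cons, List.dropWhile_cons]
        simp [pvChunksB_nil_cons, List.append_assoc]
      · by_cases h2 : r.length = prev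
        · -- same count: r joins the current run
          subst h2
          simp only [pvLoopP, if_neg h1]
          rw [if_neg (fun h => h.2 rfl)]
          rw [ihA regions (cur ++ [r]) r.length (by simpa [List.length_pos_iff] using h1)]
          simp only [pvChunksCont, List.takeWhile_cons, List.dropWhile_cons]
          simp [h1, List.append_assoc]
        · -- count change: flush cur, r starts a new run
          simp only [pvLoopP, if_neg h1, if_pos (And.intro hprev h2)]
          rw [ihA _ [r] r.length (by simpa [List.length_pos_iff] using h1)]
          simp only [pvChunksCont, List.takeWhile_cons, List.dropWhile_cons]
          simp [h2, pvChunksB_cons rs h1, pvChunksCont, List.append_assoc]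
    · intro regions
      by_cases h1 : r = []
      · subst h1
        simp only [pvLoopP]
        rw [if_pos trivial]
        rw [ihB, pvChunksB_nil_cons]
        simp
      · simp only [pvLoopP, if_neg h1]
        rw [if_neg (fun h => absurd h.1 (lt_irrefl 0))]
        rw [List.nil_append, ihA regions [r] r.length (by simpa [List.length_pos_iff] using h1)]
        rw [pvChunksB_cons rs h1]

-- ===== VERDICT (by name: the statement is the Claim_ definition above) =====
theorem detect_table_regions_dynamic_py_spec : Claim_equal_detect_table_regions_dynamic_py := by
  intro all_rows _ _
  unfold Spec_detect_table_regions_dynamic_py detect_table_regions_dynamic_py detect_table_regions_dynamic_py_alt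
  rw [pvLoopA_eq_processed]
  cases h : pvProcessB all_rows with
  | none => rfl
  | some proc => simpa using (pvLoopP_chunks proc).2 []
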